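-- pv_equiv track=rewrite | github.com/snowcrash-labs/data_preprocessing | s3_scripts/create_s3_link_csv.py | any_segment_starts_with_dot
-- ===== SOURCE A (Python) =====
-- def any_segment_starts_with_dot(relative_path: str) -> bool:
--     """True if any path component or the basename is a dot-file / dot-directory."""
--     if not relative_path:
--         return False
--     for part in relative_path.split("/"):
--         if not part:
--             continue
--         if part.startswith("."):
--             return True
--     return False
-- ===== SOURCE B (Python) =====
-- def any_segment_starts_with_dot(relative_path: str) -> bool:
--     """True if any path component or the basename is a dot-file / dot-directory."""
--     return relative_path.startswith(".") or "/." in relative_path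
-- ===== Notes on version B (the rewrite author's own statement) =====
-- stated objective: idiomatic
-- what changed: Replaces the split-and-loop over path segments with two direct string tests: a leading dot, or a dot immediately after a slash (which is always a segment start).
import Mathlib
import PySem

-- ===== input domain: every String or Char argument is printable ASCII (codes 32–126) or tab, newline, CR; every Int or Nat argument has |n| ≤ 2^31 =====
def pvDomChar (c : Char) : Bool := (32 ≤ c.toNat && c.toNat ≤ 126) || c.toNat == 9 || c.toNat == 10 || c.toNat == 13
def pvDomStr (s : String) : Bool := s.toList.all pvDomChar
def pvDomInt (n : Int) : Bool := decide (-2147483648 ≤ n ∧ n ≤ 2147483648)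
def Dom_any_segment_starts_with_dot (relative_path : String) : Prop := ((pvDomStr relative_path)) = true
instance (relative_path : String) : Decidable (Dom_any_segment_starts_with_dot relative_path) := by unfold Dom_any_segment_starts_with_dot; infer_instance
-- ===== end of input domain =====

-- B drops A's split-and-loop over segments and tests the string directly (leading dot, or dot right after a slash) — more idiomatic, same values.


-- ===== PORT A =====
def any_segment_starts_with_dot (relative_path : String) : Bool :=
  if relative_path == "" then false
  else
    ((PySem.Str.split? relative_path "/").getD []).any
      (fun part => if part == "" then false else PySem.Str.startswith part ".")

-- ===== PORT B =====
def any_segment_starts_with_dot_alt (relative_path : String) : Bool :=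
  PySem.Str.startswith relative_path "." || PySem.Str.isIn "/." relative_path

-- ===== PRECONDITION & SPEC =====
def Spec_any_segment_starts_with_dot (relative_path : String) (out : Bool) : Prop := out = any_segment_starts_with_dot_alt relative_path
instance (relative_path : String) (out : Bool) : Decidable (Spec_any_segment_starts_with_dot relative_path out) := by unfold Spec_any_segment_starts_with_dot; infer_instance

-- ===== CLAIM (what is proved, stated in full; the proofs are below) =====
def Claim_equal_any_segment_starts_with_dot : Prop := ∀ (relative_path : String), Dom_any_segment_starts_with_dot relative_path → Spec_any_segment_starts_with_dot relative_path (any_segment_starts_with_dot relative_path)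

-- ===== LEMMAS AND PROOFS =====

-- "this part starts with a dot" as a head test
def pDot (part : List Char) : Bool := part.head? == some '.'

-- the value the remainder of A's loop contributes: cur is the (reversed) current partial segment, l the unread input
def gDot : List Char → List Char → Bool
  | cur, [] => pDot cur.reverse
  | cur, c :: rest => if c = '/' then pDot cur.reverse || gDot [] rest else gDot (c :: cur) rest

theorem pred_eq_pDot (part : List Char) :
    (if String.ofList part == "" then false else PySem.Chars.startswith part ['.']) = pDot part := by
  cases part with
  | nil => simp [pDot]
  | cons c t =>
    have h : (String.ofList (c :: t) == "") = false := by
      simp [String.ext_iff]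
    simp [h, pDot, PySem.Chars.startswith, List.isPrefixOf, Bool.beq_comm]

theorem isIn_slashdot_cons (c : Char) (rest : List Char) :
    PySem.Chars.isIn ['/', '.'] (c :: rest) =
      (List.isPrefixOf ['/', '.'] (c :: rest) || PySem.Chars.isIn ['/', '.'] rest) := by
  rw [Bool.eq_iff_iff]
  simp [PySem.Chars.isIn_iff_infix, List.infix_cons_iff, List.isPrefixOf_iff_prefix]

theorem gDot_eq (l cur : List Char) :
    gDot cur l =
      ((match cur with
        | [] => PySem.Chars.startswith l ['.']
        | _ :: _ => (cur.getLast? == some '.')) || PySem.Chars.isIn ['/', '.'] l) := by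
  induction l generalizing cur with
  | nil =>
    have hnil : PySem.Chars.isIn ['/', '.'] [] = false := by decide
    cases cur with
    | nil => simp [gDot, pDot, PySem.Chars.startswith, hnil]
    | cons a t =>
      simp [gDot, pDot, hnil, List.head?_reverse, List.getLast?_cons]
  | cons c rest ih =>
    by_cases hc : c = '/'
    · subst hc
      cases cur with
      | nil =>
        simp [gDot, pDot, ih, isIn_slashdot_cons, List.isPrefixOf, PySem.Chars.startswith]
      | cons a t =>
        simp [gDot, pDot, ih, isIn_slashdot_cons, List.isPrefixOf, PySem.Chars.startswith,
              List.head?_reverse, List.getLast?_cons]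
    · have hpre : List.isPrefixOf ['/', '.'] (c :: rest) = false := by
        simp [List.isPrefixOf]
        intro h; exact absurd h.symm hc
      have hcb : (c == '/') = false := by simpa using hc
      cases cur with
      | nil =>
        simp [gDot, hc, hcb, ih, isIn_slashdot_cons, PySem.Chars.startswith, List.isPrefixOf,
              Bool.beq_comm]
      | cons a t =>
        have hcb' : ('/' == c) = false := beq_eq_false_iff_ne.mpr (Ne.symm hc)
        rw [isIn_slashdot_cons]
        simp [gDot, hc, ih, List.isPrefixOf, hcb']

theorem splitOn_go_any (fuel : Nat) :
    ∀ (l cur : List Char) (acc : List (List Char)), l.length ≤ fuel →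
      (PySem.Chars.splitOn.go ['/'] fuel l cur acc).any pDot = (acc.any pDot || gDot cur l) := by
  induction fuel with
  | zero =>
    intro l cur acc hl
    have : l = [] := List.eq_nil_of_length_eq_zero (Nat.le_zero.mp hl)
    subst this
    simp [PySem.Chars.splitOn.go, gDot, Bool.or_comm]
  | succ fuel ih =>
    intro l cur acc hl
    cases l with
    | nil => simp [PySem.Chars.splitOn.go, gDot, Bool.or_comm]
    | cons c rest =>
      by_cases hc : c = '/'
      · subst hc
        have hpre : List.isPrefixOf ['/'] ('/' :: rest) = true := by simp [List.isPrefixOf]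
        rw [PySem.Chars.splitOn.go]
        simp only [hpre, if_true, List.drop_succ_cons, List.length_nil, List.drop_zero, List.length_cons] at *
        rw [ih rest [] (cur.reverse :: acc) (by omega)]
        simp [gDot, Bool.or_left_comm, Bool.or_comm]
      · have hpre : List.isPrefixOf ['/'] (c :: rest) = false := by
          simp [List.isPrefixOf]
          intro h; exact absurd h.symm hc
        rw [PySem.Chars.splitOn.go]
        simp only [hpre, if_false, Bool.false_eq_true]
        rw [ih rest (c :: cur) acc (by simpa using Nat.lt_succ_iff.mp (by simpa using hl))]
        simp [gDot, hc]

theorem chars_main (cs : List Char) :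
    (PySem.Chars.splitOn cs ['/']).any pDot =
      (PySem.Chars.startswith cs ['.'] || PySem.Chars.isIn ['/', '.'] cs) := by
  unfold PySem.Chars.splitOn
  rw [splitOn_go_any (cs.length + 1) cs [] [] (by omega)]
  simp [gDot_eq]

theorem any_map_pred (parts : List (List Char)) :
    (parts.map String.ofList).any
        (fun part => if part == "" then false else PySem.Str.startswith part ".") =
      parts.any pDot := by
  induction parts with
  | nil => rfl
  | cons p t ih =>
    simp only [List.map_cons, List.any_cons, ih]
    congr 1
    simpa [PySem.Str.startswith_eq] using pred_eq_pDot p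

theorem any_segment_starts_with_dot_spec : Claim_equal_any_segment_starts_with_dot := by
  intro s _
  unfold Spec_any_segment_starts_with_dot any_segment_starts_with_dot any_segment_starts_with_dot_alt
  by_cases h : s = ""
  · subst h; decide
  · have hb : (s == "") = false := beq_eq_false_iff_ne.mpr h
    rw [if_neg (by simp [hb])]
    rw [PySem.Str.split?]
    have hsep : "/".toList = ['/'] := rfl
    simp only [PySem.Chars.split?, hsep, List.isEmpty_cons, if_false,
      Option.map_some, Option.getD_some, Bool.false_eq_true]
    rw [any_map_pred, chars_main, PySem.Str.startswith_eq, PySem.Str.isIn_eq]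
    rfl
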